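-- pv_equiv track=rewrite | github.com/leonarduk/allotmint | .github/scripts/review_common.py | split_diff_blocks
-- ===== SOURCE A (Python) =====
-- def split_diff_blocks(diff_text: str) -> list[str]:
--     """Split a git diff into whole-file blocks so truncation never cuts mid-file.
--
--     Preserving complete `diff --git` blocks avoids mid-line truncation and helps keep YAML/JSON
--     hunks structurally intelligible when the workflow must drop content to fit the model budget.
--     """
--     if not diff_text:
--         return []
--
--     blocks: list[str] = []
--     current: list[str] = []
--     for line in diff_text.splitlines(keepends=True):
--         if line.startswith("diff --git ") and current:
--             blocks.append("".join(current))
--             current = [line]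
--         else:
--             current.append(line)
--     if current:
--         blocks.append("".join(current))
--     return blocks
-- ===== SOURCE B (Python) =====
-- def split_diff_blocks(diff_text: str) -> list[str]:
--     """Two-pointer span scan: for each block, advance a second index to the next
--     `diff --git ` header and join that whole slice at once — no accumulate-and-flush
--     state is maintained."""
--     lines = diff_text.splitlines(keepends=True)
--     blocks: list[str] = []
--     i = 0
--     n = len(lines)
--     while i < n:
--         j = i + 1
--         while j < n and not lines[j].startswith("diff --git "):
--             j += 1
--         blocks.append("".join(lines[i:j]))
--         i = j
--     return blocks
-- ===== Notes on version B (the rewrite author's own statement) =====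
-- stated objective: alternative
-- what changed: Replaces A's streaming accumulate-and-flush loop (pending-line list flushed at each header) with a two-pointer span scan that advances a second index to the next git file-header line and joins each whole slice at once.
import Mathlib
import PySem

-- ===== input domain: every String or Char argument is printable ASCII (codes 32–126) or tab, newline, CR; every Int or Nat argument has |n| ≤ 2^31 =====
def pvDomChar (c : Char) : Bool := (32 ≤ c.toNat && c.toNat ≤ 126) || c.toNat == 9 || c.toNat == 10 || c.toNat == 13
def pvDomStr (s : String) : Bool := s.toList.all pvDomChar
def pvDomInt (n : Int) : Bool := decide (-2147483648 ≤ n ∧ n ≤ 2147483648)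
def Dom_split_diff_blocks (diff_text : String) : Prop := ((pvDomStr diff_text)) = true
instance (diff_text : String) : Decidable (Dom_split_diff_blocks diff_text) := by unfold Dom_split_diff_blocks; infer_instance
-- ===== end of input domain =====

-- B replaces A's streaming accumulate-and-flush loop with a span scan: each block is
-- the slice from the current line to the next `diff --git ` header, joined at once.

-- Shared primitive: Python's str.splitlines(keepends=True), exact on the Dom alphabet
-- (the only line-break characters there are '\n', '\r' and "\r\n"); strings are carried
-- as List Char and packed with String.mk at the end.
def pvLinesKeep : List Char → List Char → List (List Char)
  | acc, [] => if acc = [] then [] else [acc.reverse]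
  | acc, '\r' :: '\n' :: rest => (acc.reverse ++ ['\r', '\n']) :: pvLinesKeep [] rest
  | acc, '\r' :: rest => (acc.reverse ++ ['\r']) :: pvLinesKeep [] rest
  | acc, '\n' :: rest => (acc.reverse ++ ['\n']) :: pvLinesKeep [] rest
  | acc, c :: rest => pvLinesKeep (c :: acc) rest

-- line.startswith("diff --git ")
def pvMarker (line : List Char) : Bool := PySem.Chars.startswith line "diff --git ".toList

-- ===== PORT A =====
def split_diff_blocks (diff_text : String) : List String :=
  if diff_text = "" then []
  else
    let r := (pvLinesKeep [] diff_text.toList).foldl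
      (fun (st : List (List Char) × List (List Char)) line =>
        if pvMarker line && !st.2.isEmpty then
          (st.1 ++ [PySem.Chars.join [] st.2], [line])
        else
          (st.1, st.2 ++ [line]))
      ([], [])
    (if r.2.isEmpty then r.1 else r.1 ++ [PySem.Chars.join [] r.2]).map String.mk

-- ===== PORT B =====
-- Source B's outer `while i < n` walks block starts; here it is the structural recursion
-- on the remaining suffix of lines. The inner `while j < n and not marker` that finds
-- the end of the span is takeWhile/dropWhile, and ''.join(lines[i:j]) joins the span.
def pvSpanBlocks : List (List Char) → List (List Char)
  | [] => []
  | head :: rest =>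
    PySem.Chars.join [] (head :: rest.takeWhile (fun l => !pvMarker l))
      :: pvSpanBlocks (rest.dropWhile (fun l => !pvMarker l))
termination_by ls => ls.length
decreasing_by
  exact Nat.lt_succ_of_le (List.length_dropWhile_le _ _)

def split_diff_blocks_alt (diff_text : String) : List String :=
  (pvSpanBlocks (pvLinesKeep [] diff_text.toList)).map String.mk

-- ===== PRECONDITION & SPEC =====
def Spec_split_diff_blocks (diff_text : String) (out : List String) : Prop := out = split_diff_blocks_alt diff_text
instance (diff_text : String) (out : List String) : Decidable (Spec_split_diff_blocks diff_text out) := by unfold Spec_split_diff_blocks; infer_instance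

-- ===== CLAIM (what is proved, stated in full; the proofs are below) =====
def Claim_equal_split_diff_blocks : Prop := ∀ (diff_text : String), Dom_split_diff_blocks diff_text → Spec_split_diff_blocks diff_text (split_diff_blocks diff_text)

-- ===== LEMMAS AND PROOFS =====

-- canonical grouping of a line list, first block started by `cur`
def grpSpec (cur : List Char) : List (List Char) → List (List Char)
  | [] => [cur]
  | l :: rest => if pvMarker l then cur :: grpSpec l rest else grpSpec (cur ++ l) rest

theorem join_nil_eq_flatten (ps : List (List Char)) : PySem.Chars.join [] ps = ps.flatten := by
  induction ps with
  | nil => simp [PySem.Chars.join, List.intercalate]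
  | cons h t ih =>
    cases t with
    | nil => simp [PySem.Chars.join, List.intercalate]
    | cons h2 t2 =>
      rw [PySem.Chars.join_cons_cons, ih]
      simp

theorem pvLinesKeep_eq_nil_iff (acc cs : List Char) :
    pvLinesKeep acc cs = [] ↔ (acc = [] ∧ cs = []) := by
  fun_induction pvLinesKeep acc cs
  all_goals simp_all

-- A's fold, started with a nonempty pending block, produces grpSpec
theorem foldA_eq (L : List (List Char)) (bs cur : List (List Char)) (hc : cur ≠ []) :
    (if (L.foldl
      (fun (st : List (List Char) × List (List Char)) line =>
        if pvMarker line && !st.2.isEmpty then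
          (st.1 ++ [PySem.Chars.join [] st.2], [line])
        else
          (st.1, st.2 ++ [line])) (bs, cur)).2.isEmpty
     then (L.foldl
      (fun (st : List (List Char) × List (List Char)) line =>
        if pvMarker line && !st.2.isEmpty then
          (st.1 ++ [PySem.Chars.join [] st.2], [line])
        else
          (st.1, st.2 ++ [line])) (bs, cur)).1
     else (L.foldl
      (fun (st : List (List Char) × List (List Char)) line =>
        if pvMarker line && !st.2.isEmpty then
          (st.1 ++ [PySem.Chars.join [] st.2], [line])
        else
          (st.1, st.2 ++ [line])) (bs, cur)).1 ++ [PySem.Chars.join [] (L.foldl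
      (fun (st : List (List Char) × List (List Char)) line =>
        if pvMarker line && !st.2.isEmpty then
          (st.1 ++ [PySem.Chars.join [] st.2], [line])
        else
          (st.1, st.2 ++ [line])) (bs, cur)).2])
    = bs ++ grpSpec (PySem.Chars.join [] cur) L := by
  induction L generalizing bs cur with
  | nil =>
    simp only [List.foldl_nil]
    simp [grpSpec, List.isEmpty_iff, hc]
  | cons l rest ih =>
    simp only [List.foldl_cons, grpSpec]
    by_cases hm : pvMarker l
    · have hcur : cur.isEmpty = false := by simp [hc]
      simp only [hm, hcur, Bool.not_false, Bool.and_self, if_true]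
      rw [ih _ [l] (by simp)]
      simp [join_nil_eq_flatten, List.append_assoc]
    · simp only [hm, Bool.false_and, Bool.false_eq_true, if_false]
      rw [ih _ (cur ++ [l]) (by simp)]
      simp [join_nil_eq_flatten]

-- B's span recursion computes the same grouping
theorem grpSpec_eq_span (L : List (List Char)) (cur : List Char) :
    grpSpec cur L
      = (cur ++ (L.takeWhile (fun l => !pvMarker l)).flatten)
          :: pvSpanBlocks (L.dropWhile (fun l => !pvMarker l)) := by
  induction L generalizing cur with
  | nil => simp [grpSpec, pvSpanBlocks]
  | cons l rest ih =>
    simp only [grpSpec]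
    by_cases hm : pvMarker l
    · simp only [hm, if_true, List.takeWhile_cons, List.dropWhile_cons, Bool.not_true,
        Bool.false_eq_true, if_false]
      rw [pvSpanBlocks, ih l]
      simp [join_nil_eq_flatten]
    · simp only [hm, Bool.false_eq_true, if_false, List.takeWhile_cons, List.dropWhile_cons]
      rw [ih (cur ++ l)]
      simp [List.append_assoc]

theorem toList_eq_nil_iff (s : String) : s.toList = [] ↔ s = "" := by
  cases s
  simp

-- ===== VERDICT (by name: the statement is the Claim_ definition above) =====
theorem split_diff_blocks_spec : Claim_equal_split_diff_blocks := by
  intro s _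
  show split_diff_blocks s = split_diff_blocks_alt s
  by_cases hs : s = ""
  · subst hs
    simp [split_diff_blocks, split_diff_blocks_alt, pvLinesKeep, pvSpanBlocks]
  · have hcs : s.toList ≠ [] := fun h => hs ((toList_eq_nil_iff s).mp h)
    have hL : pvLinesKeep [] s.toList ≠ [] := by
      rw [Ne, pvLinesKeep_eq_nil_iff]; simp [hcs]
    obtain ⟨l0, rest, hLr⟩ := List.exists_cons_of_ne_nil hL
    -- A side: the fold computes grpSpec l0 rest
    have hA : split_diff_blocks s = (grpSpec l0 rest).map String.mk := by
      simp only [split_diff_blocks, if_neg hs, hLr]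
      rw [List.foldl_cons]
      have h0 : (if pvMarker l0 && !(([] : List (List Char)).isEmpty) then
          (([] : List (List Char)) ++ [PySem.Chars.join [] ([] : List (List Char))], [l0])
        else (([] : List (List Char)), ([] : List (List Char)) ++ [l0]))
        = (([] : List (List Char)), [l0]) := by simp
      rw [h0, foldA_eq rest [] [l0] (by simp)]
      simp
    -- B side: the span recursion computes grpSpec l0 rest
    have hB : split_diff_blocks_alt s = (grpSpec l0 rest).map String.mk := by
      simp only [split_diff_blocks_alt, hLr]
      rw [pvSpanBlocks, grpSpec_eq_span rest l0]
      simp [join_nil_eq_flatten]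
    rw [hA, hB]
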